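-- pv_equiv track=rewrite | github.com/alexanderfrey/reasonable | debug_rlhf_inference.py | iter_manual_prompts
-- ===== SOURCE A (Python) =====
-- from typing import Dict, Iterable, List, Optional, Sequence, Tuple
--
-- def iter_manual_prompts(prompts: Sequence[str], batch_size: int) -> Iterable[Dict[str, List[Optional[str]]]]:
--     buf: List[str] = []
--     for prompt in prompts:
--         if not prompt:
--             continue
--         buf.append(prompt)
--         if len(buf) == batch_size:
--             yield {"prompt_text": buf[:], "ref_response": [None] * len(buf)}
--             buf.clear()
--     if buf:
--         yield {"prompt_text": buf[:], "ref_response": [None] * len(buf)}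
-- ===== SOURCE B (Python) =====
-- def iter_manual_prompts(prompts, batch_size):
--     filtered = [p for p in prompts if p]
--     step = batch_size if batch_size > 0 else len(filtered)
--     while filtered:
--         chunk, filtered = filtered[:step], filtered[step:]
--         yield {"prompt_text": chunk, "ref_response": [None] * len(chunk)}
-- ===== Notes on version B (the rewrite author's own statement) =====
-- stated objective: simpler
-- what changed: B filters the non-empty prompts in one pass and then slices that list into fixed-size chunks with a while loop, instead of A's single buffered pass that accumulates and flushes a buffer; non-positive batch_size naturally becomes one batch of everything.
import Mathlib
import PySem

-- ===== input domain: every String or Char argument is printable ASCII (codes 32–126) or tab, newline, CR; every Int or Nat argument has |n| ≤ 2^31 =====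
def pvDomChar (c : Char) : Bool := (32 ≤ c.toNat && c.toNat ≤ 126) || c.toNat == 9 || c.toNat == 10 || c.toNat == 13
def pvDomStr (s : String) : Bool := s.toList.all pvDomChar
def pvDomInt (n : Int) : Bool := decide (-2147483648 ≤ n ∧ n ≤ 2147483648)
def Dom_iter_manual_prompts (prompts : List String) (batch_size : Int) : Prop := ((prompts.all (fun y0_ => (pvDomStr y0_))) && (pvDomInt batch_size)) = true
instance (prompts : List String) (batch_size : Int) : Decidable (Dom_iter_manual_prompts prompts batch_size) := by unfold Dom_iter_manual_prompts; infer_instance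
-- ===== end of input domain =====

-- B filters the non-empty prompts first and then slices that list into chunks (a simpler
-- two-phase decomposition); A makes one buffered pass. Proved equal on every input.

-- the yielded dict {"prompt_text": buf[:], "ref_response": [None] * len(buf)} (identical literal in both Pythons)
def pvBatch (buf : List String) : List (String × List (Option String)) :=
  [("prompt_text", buf.map some), ("ref_response", List.replicate buf.length none)]

-- ===== PORT A =====
-- loop body of A: skip falsy prompt, append to buf, flush when len(buf) == batch_size
def pvAStep (batch_size : Int)
    (st : List String × List (List (String × List (Option String)))) (prompt : String) :
    List String × List (List (String × List (Option String))) :=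
  if prompt = "" then st
  else
    let buf := st.1 ++ [prompt]
    if (buf.length : Int) = batch_size then ([], st.2 ++ [pvBatch buf]) else (buf, st.2)

def iter_manual_prompts (prompts : List String) (batch_size : Int) :
    List (List (String × List (Option String))) :=
  let st := prompts.foldl (pvAStep batch_size) ([], [])
  if st.1 = [] then st.2 else st.2 ++ [pvBatch st.1]

-- ===== PORT B =====
-- the while loop of B: chunk, filtered = filtered[:step], filtered[step:]
-- (fuel = the initial length of filtered, only to make the recursion structurally total;
--  whenever the loop is entered step ≥ 1, so the fuel never runs out before the list does)
def pvBLoop : Nat → Int → List String → List (List (String × List (Option String)))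
  | 0, _, _ => []
  | fuel + 1, step, filtered =>
    if filtered = [] then []
    else pvBatch (PySem.List.slice filtered none (some step)) ::
         pvBLoop fuel step (PySem.List.slice filtered (some step) none)

def iter_manual_prompts_alt (prompts : List String) (batch_size : Int) :
    List (List (String × List (Option String))) :=
  let filtered := prompts.filter (fun p => p != "")
  let step := if batch_size > 0 then batch_size else (filtered.length : Int)
  pvBLoop filtered.length step filtered

-- ===== PRECONDITION & SPEC =====
def Spec_iter_manual_prompts (prompts : List String) (batch_size : Int) (out : List (List (String × List (Option String)))) : Prop := out = iter_manual_prompts_alt prompts batch_size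
instance (prompts : List String) (batch_size : Int) (out : List (List (String × List (Option String)))) : Decidable (Spec_iter_manual_prompts prompts batch_size out) := by unfold Spec_iter_manual_prompts; infer_instance

-- ===== CLAIM (what is proved, stated in full; the proofs are below) =====
def Claim_equal_iter_manual_prompts : Prop := ∀ (prompts : List String) (batch_size : Int), Dom_iter_manual_prompts prompts batch_size → Spec_iter_manual_prompts prompts batch_size (iter_manual_prompts prompts batch_size)

-- ===== LEMMAS AND PROOFS =====

-- reference chunking: split l into pieces of size k, last piece possibly shorter
def pvChunks (k : Nat) (l : List String) : List (List String) :=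
  if h : k = 0 ∨ l = [] then []
  else l.take k :: pvChunks k (l.drop k)
termination_by l.length
decreasing_by
  have hk : 0 < k := Nat.pos_of_ne_zero (fun hh => h (Or.inl hh))
  have hl : 0 < l.length := List.length_pos_of_ne_nil (fun hh => h (Or.inr hh))
  simp [List.length_drop]; omega

lemma pvChunks_nil (k : Nat) : pvChunks k [] = [] := by
  unfold pvChunks; simp

-- A's fold ignores empty strings: fold over prompts = fold over the filtered list
lemma pvA_filter (batch_size : Int) (prompts : List String)
    (st : List String × List (List (String × List (Option String)))) :
    prompts.foldl (pvAStep batch_size) st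
      = (prompts.filter (fun p => p != "")).foldl (pvAStep batch_size) st := by
  induction prompts generalizing st with
  | nil => rfl
  | cons p rest ih =>
    by_cases hp : p = ""
    · subst hp; simp [pvAStep, ih]
    · simp [hp, ih]

-- flush of A's final state
def pvFlush (st : List String × List (List (String × List (Option String)))) :
    List (List (String × List (Option String))) :=
  if st.1 = [] then st.2 else st.2 ++ [pvBatch st.1]

-- pvChunks unfolding for a non-trivial chunk
lemma pvChunks_cons (k : Nat) (hk : 1 ≤ k) (l : List String) (hl : l ≠ []) :
    pvChunks k l = l.take k :: pvChunks k (l.drop k) := by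
  rw [pvChunks, dif_neg]
  rintro (h | h)
  · omega
  · exact hl h

-- main invariant of A's pass for positive batch size, over lists of non-empty prompts
lemma pvA_chunks (k : Nat) (hk : 1 ≤ k) (l : List String) (hl : ∀ p ∈ l, p ≠ "")
    (buf : List String) (acc : List (List (String × List (Option String))))
    (hbuf : buf.length < k) :
    pvFlush (l.foldl (pvAStep (k : Int)) (buf, acc))
      = acc ++ (pvChunks k (buf ++ l)).map pvBatch := by
  induction l generalizing buf acc with
  | nil =>
    simp only [List.foldl_nil, List.append_nil]
    by_cases hb : buf = []
    · subst hb; simp [pvFlush, pvChunks_nil]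
    · have h1 : buf.take k = buf := List.take_of_length_le (by omega)
      have h2 : buf.drop k = [] := List.drop_eq_nil_of_le (by omega)
      have hR : pvChunks k buf = [buf] := by
        rw [pvChunks_cons k hk buf hb, h1, h2, pvChunks_nil]
      simp [pvFlush, hb, hR]
  | cons p rest ih =>
    have hp : p ≠ "" := hl p (by simp)
    have hrest : ∀ q ∈ rest, q ≠ "" := fun q hq => hl q (by simp [hq])
    simp only [List.foldl_cons]
    rw [show pvAStep (k : Int) (buf, acc) p
        = (if ((buf ++ [p]).length : Int) = (k : Int) then ([], acc ++ [pvBatch (buf ++ [p])])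
           else (buf ++ [p], acc)) from by simp [pvAStep, hp]]
    by_cases hfull : (buf ++ [p]).length = k
    · rw [if_pos (by exact_mod_cast hfull)]
      rw [ih hrest [] (acc ++ [pvBatch (buf ++ [p])]) (by simp only [List.length_nil]; omega)]
      have hsplit : buf ++ p :: rest = (buf ++ [p]) ++ rest := by simp
      have htk : ((buf ++ [p]) ++ rest).take k = buf ++ [p] := by
        rw [← hfull]; exact List.take_left
      have hdk : ((buf ++ [p]) ++ rest).drop k = rest := by
        rw [← hfull]; exact List.drop_left
      have hR : pvChunks k (buf ++ p :: rest) = (buf ++ [p]) :: pvChunks k rest := by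
        rw [hsplit, pvChunks_cons k hk _ (by simp), htk, hdk]
      rw [hR]
      simp
    · rw [if_neg (by exact_mod_cast hfull)]
      rw [ih hrest (buf ++ [p]) acc (by simp at hfull ⊢; omega)]
      simp

-- A's behaviour for non-positive batch size: the buffer is never flushed inside the loop
lemma pvA_nonpos (bs : Int) (hbs : bs ≤ 0) (l : List String) (hl : ∀ p ∈ l, p ≠ "")
    (buf : List String) (acc : List (List (String × List (Option String)))) :
    l.foldl (pvAStep bs) (buf, acc) = (buf ++ l, acc) := by
  induction l generalizing buf with
  | nil => simp
  | cons p rest ih =>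
    have hp : p ≠ "" := hl p (by simp)
    simp only [List.foldl_cons]
    rw [show pvAStep bs (buf, acc) p = (buf ++ [p], acc) from by simp [pvAStep, hp]; omega]
    rw [ih (fun q hq => hl q (by simp [hq]))]
    simp

-- B's while loop computes exactly the reference chunking (step = k ≥ 1, enough fuel)
lemma pvB_chunks (k : Nat) (hk : 1 ≤ k) (l : List String) (fuel : Nat)
    (hfuel : l.length ≤ fuel) :
    pvBLoop fuel (k : Int) l = (pvChunks k l).map pvBatch := by
  induction fuel generalizing l with
  | zero =>
    have : l = [] := List.eq_nil_of_length_eq_zero (by omega)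
    subst this; simp [pvBLoop, pvChunks_nil]
  | succ n ih =>
    by_cases hl : l = []
    · subst hl; simp [pvBLoop, pvChunks_nil]
    · rw [pvBLoop, if_neg hl, PySem.List.slice_to_natCast, PySem.List.slice_from_natCast]
      have hlen : 0 < l.length := List.length_pos_of_ne_nil hl
      rw [ih (l.drop k) (by simp [List.length_drop]; omega)]
      rw [pvChunks_cons k hk l hl]
      simp

-- the two ports agree on every input
lemma pv_main (prompts : List String) (batch_size : Int) :
    iter_manual_prompts prompts batch_size = iter_manual_prompts_alt prompts batch_size := by
  have hA : iter_manual_prompts prompts batch_size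
      = pvFlush (prompts.foldl (pvAStep batch_size) ([], [])) := rfl
  have hfilter : ∀ p ∈ prompts.filter (fun p => p != ""), p ≠ "" := by
    intro p hp
    have := (List.mem_filter.mp hp).2
    simpa using this
  rw [hA, pvA_filter]
  set f := prompts.filter (fun p => p != "") with hf
  by_cases hbs : batch_size > 0
  · have hcast : ((batch_size.toNat : Nat) : Int) = batch_size := Int.toNat_of_nonneg (by omega)
    have hk : 1 ≤ batch_size.toNat := by omega
    rw [show iter_manual_prompts_alt prompts batch_size
        = pvBLoop f.length (if batch_size > 0 then batch_size else (f.length : Int)) f from rfl]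
    rw [if_pos hbs, ← hcast]
    rw [pvB_chunks batch_size.toNat hk f f.length le_rfl]
    rw [pvA_chunks batch_size.toNat hk f hfilter [] [] (by simp only [List.length_nil]; omega)]
    simp
  · have hnp : batch_size ≤ 0 := by omega
    rw [pvA_nonpos batch_size hnp f hfilter [] []]
    rw [show iter_manual_prompts_alt prompts batch_size
        = pvBLoop f.length (if batch_size > 0 then batch_size else (f.length : Int)) f from rfl]
    rw [if_neg hbs]
    by_cases hfe : f = []
    · rw [hfe]; simp [pvFlush, pvBLoop]
    · have hlen : 1 ≤ f.length := by
        have := List.length_pos_of_ne_nil hfe; omega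
      rw [pvB_chunks f.length hlen f f.length le_rfl]
      have hR : pvChunks f.length f = [f] := by
        rw [pvChunks_cons f.length hlen f hfe, List.take_of_length_le (le_refl f.length),
          List.drop_eq_nil_of_le (le_refl f.length), pvChunks_nil]
      rw [hR]
      simp [pvFlush, hfe]

-- ===== VERDICT (by name: the statement is the Claim_ definition above) =====
theorem iter_manual_prompts_spec : Claim_equal_iter_manual_prompts := by
  intro prompts batch_size _
  exact pv_main prompts batch_size
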